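-- pv_equiv track=rewrite | github.com/Korred/Simple-Interpreter | Blatt 6/game_of_life_alt.py | from_lifestring
-- ===== SOURCE A (Python) =====
-- def from_lifestring(string):
--     '''
--     Creates Game of Life field from given string
--     returns set with (x,y) coordinates of living cells
--     '''
--
--     lines = string.split("\n")
--     field = set()
--
--     for y, line in enumerate(lines):
--         for x, char in enumerate(line):
--             if char == 'X':
--                 field.add((x, y))
--
--     return field
-- ===== SOURCE B (Python) =====
-- def from_lifestring(string):
--     '''
--     Creates Game of Life field from given string
--     returns set with (x,y) coordinates of living cells
--     '''
--     field = set()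
--     x = 0
--     y = 0
--     for char in string:
--         if char == '\n':
--             y += 1
--             x = 0
--         else:
--             if char == 'X':
--                 field.add((x, y))
--             x += 1
--     return field
-- ===== Notes on version B (the rewrite author's own statement) =====
-- stated objective: alternative
-- what changed: Replaces the split-into-lines plus nested enumerate loops with a single flat pass over the string that maintains x,y counters by hand (newline increments y and resets x).
import Mathlib
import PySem

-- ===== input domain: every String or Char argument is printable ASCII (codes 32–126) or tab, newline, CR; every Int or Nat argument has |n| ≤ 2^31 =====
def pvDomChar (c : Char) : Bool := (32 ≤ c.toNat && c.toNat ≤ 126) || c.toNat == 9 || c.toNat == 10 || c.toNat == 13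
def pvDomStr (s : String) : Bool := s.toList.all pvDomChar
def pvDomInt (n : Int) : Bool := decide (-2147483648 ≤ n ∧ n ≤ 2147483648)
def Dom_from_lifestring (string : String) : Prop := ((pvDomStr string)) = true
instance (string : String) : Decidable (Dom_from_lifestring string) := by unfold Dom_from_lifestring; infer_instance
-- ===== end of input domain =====

-- B replaces split-into-lines + nested enumerate with one flat pass keeping x,y counters (alternative decomposition, same cost).

-- ===== PORT A =====
def from_lifestring (string : String) : List (Int × Int) :=
  -- lines = string.split("\n")  (separator non-empty, so split never raises; exact via Chars.splitOn)
  let lines := PySem.Chars.splitOn string.toList ['\n']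
  (PySem.List.enumerate lines).foldl
    (fun field (p : Int × List Char) =>
      (PySem.List.enumerate p.2).foldl
        (fun f (q : Int × Char) =>
          if q.2 = 'X' then PySem.Set.add f (q.1, p.1) else f)
        field)
    []

-- ===== PORT B =====
-- one step of B's flat scan: state (x, y, field)
def pvStepB (st : Int × Int × List (Int × Int)) (c : Char) : Int × Int × List (Int × Int) :=
  if c = '\n' then (0, st.2.1 + 1, st.2.2)
  else (st.1 + 1, st.2.1,
        if c = 'X' then PySem.Set.add st.2.2 (st.1, st.2.1) else st.2.2)

def from_lifestring_alt (string : String) : List (Int × Int) :=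
  (string.toList.foldl pvStepB ((0 : Int), (0 : Int), ([] : List (Int × Int)))).2.2

-- ===== PRECONDITION & SPEC =====
def Spec_from_lifestring (string : String) (out : List (Int × Int)) : Prop := out = from_lifestring_alt string
instance (string : String) (out : List (Int × Int)) : Decidable (Spec_from_lifestring string out) := by unfold Spec_from_lifestring; infer_instance

-- ===== CLAIM (what is proved, stated in full; the proofs are below) =====
def Claim_equal_from_lifestring : Prop := ∀ (string : String), Dom_from_lifestring string → Spec_from_lifestring string (from_lifestring string)

-- ===== LEMMAS AND PROOFS =====

-- reference splitter on '\n' (structural version of Chars.splitOn · ['\n'])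
def mySplit : List Char → List (List Char)
  | [] => [[]]
  | c :: rest =>
    if c = '\n' then [] :: mySplit rest
    else
      match mySplit rest with
      | l :: ls => (c :: l) :: ls
      | [] => [[c]]

def mapHead (f : List Char → List Char) : List (List Char) → List (List Char)
  | [] => []
  | l :: ls => f l :: ls

theorem mySplit_ne_nil (cs : List Char) : mySplit cs ≠ [] := by
  cases cs with
  | nil => simp [mySplit]
  | cons c rest =>
    simp only [mySplit]
    split
    · simp
    · cases h : mySplit rest <;> simp

theorem mySplit_cons (c : Char) (rest : List Char) :
    mySplit (c :: rest) =
      if c = '\n' then [] :: mySplit rest else mapHead (c :: ·) (mySplit rest) := by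
  simp only [mySplit]
  split
  · rfl
  · cases h : mySplit rest with
    | nil => exact absurd h (mySplit_ne_nil rest)
    | cons l ls => simp [mapHead]

theorem go_eq_mySplit : ∀ (fuel : Nat) (l cur : List Char) (acc : List (List Char)),
    l.length < fuel →
    PySem.Chars.splitOn.go ['\n'] fuel l cur acc =
      acc.reverse ++ mapHead (cur.reverse ++ ·) (mySplit l) := by
  intro fuel
  induction fuel with
  | zero => intro l cur acc h; omega
  | succ n ih =>
    intro l cur acc h
    cases l with
    | nil => simp [PySem.Chars.splitOn.go, mySplit, mapHead]
    | cons c rest =>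
      rw [PySem.Chars.splitOn.go]
      by_cases hc : c = '\n'
      · subst hc
        have hpre : List.isPrefixOf ['\n'] ('\n' :: rest) = true := by
          simp [List.isPrefixOf]
        rw [if_pos hpre]
        show PySem.Chars.splitOn.go ['\n'] n rest [] (cur.reverse :: acc) = _
        rw [ih rest [] (cur.reverse :: acc) (by simpa using Nat.lt_of_succ_lt_succ h)]
        rw [mySplit_cons]
        simp only [mapHead, List.reverse_cons, List.append_assoc,
          List.singleton_append, List.reverse_nil, List.nil_append]
        cases hh : mySplit rest with
        | nil => exact absurd hh (mySplit_ne_nil rest)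
        | cons l ls => simp
      · have hpre : List.isPrefixOf ['\n'] (c :: rest) = false := by
          simp [List.isPrefixOf]
          exact fun hh => absurd hh.symm hc
        simp only [hpre, Bool.false_eq_true, if_false]
        rw [ih rest (c :: cur) acc (by simpa using Nat.lt_of_succ_lt_succ h)]
        rw [mySplit_cons]
        simp only [hc, if_false]
        cases hh : mySplit rest with
        | nil => exact absurd hh (mySplit_ne_nil rest)
        | cons l ls => simp [mapHead]

theorem splitOn_eq_mySplit (cs : List Char) :
    PySem.Chars.splitOn cs ['\n'] = mySplit cs := by
  show PySem.Chars.splitOn.go ['\n'] (cs.length + 1) cs [] [] = _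
  rw [go_eq_mySplit (cs.length + 1) cs [] [] (by omega)]
  cases h : mySplit cs with
  | nil => exact absurd h (mySplit_ne_nil cs)
  | cons l ls => simp [mapHead]

-- A's inner fold over one line, enumerate starting at x, row index y
def rowFold (l : List Char) (x y : Int) (acc : List (Int × Int)) : List (Int × Int) :=
  (PySem.List.enumerate l x).foldl
    (fun f (q : Int × Char) => if q.2 = 'X' then PySem.Set.add f (q.1, y) else f) acc

-- A's outer loop, generalized to a mid-line start x for the first line
def linesFold : List (List Char) → Int → Int → List (Int × Int) → List (Int × Int)
  | [], _, _, acc => acc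
  | l :: ls, x, y, acc => linesFold ls 0 (y + 1) (rowFold l x y acc)

theorem rowFold_cons (c : Char) (l : List Char) (x y : Int) (acc : List (Int × Int)) :
    rowFold (c :: l) x y acc =
      rowFold l (x + 1) y (if c = 'X' then PySem.Set.add acc (x, y) else acc) := by
  simp [rowFold, PySem.List.enumerate_cons]

theorem foldB_eq_linesFold : ∀ (cs : List Char) (x y : Int) (acc : List (Int × Int)),
    (cs.foldl pvStepB (x, y, acc)).2.2 = linesFold (mySplit cs) x y acc := by
  intro cs
  induction cs with
  | nil => intro x y acc; simp [mySplit, linesFold, rowFold, PySem.List.enumerate]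
  | cons c rest ih =>
    intro x y acc
    rw [mySplit_cons]
    by_cases hc : c = '\n'
    · simp only [hc, if_pos]
      have : pvStepB (x, y, acc) '\n' = (0, y + 1, acc) := by simp [pvStepB]
      rw [List.foldl_cons, this, ih]
      simp [linesFold, rowFold, PySem.List.enumerate]
    · have hstep : pvStepB (x, y, acc) c =
          (x + 1, y, if c = 'X' then PySem.Set.add acc (x, y) else acc) := by
        simp [pvStepB, hc]
      rw [List.foldl_cons, hstep, ih]
      simp only [hc, if_false]
      cases hh : mySplit rest with
      | nil => exact absurd hh (mySplit_ne_nil rest)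
      | cons l ls =>
        simp only [mapHead, linesFold]
        rw [rowFold_cons]

theorem foldA_eq_linesFold : ∀ (ls : List (List Char)) (y : Int) (acc : List (Int × Int)),
    (PySem.List.enumerate ls y).foldl
      (fun field (p : Int × List Char) =>
        (PySem.List.enumerate p.2).foldl
          (fun f (q : Int × Char) =>
            if q.2 = 'X' then PySem.Set.add f (q.1, p.1) else f)
          field)
      acc = linesFold ls 0 y acc := by
  intro ls
  induction ls with
  | nil => intro y acc; simp [linesFold, PySem.List.enumerate]
  | cons l rest ih =>
    intro y acc
    rw [PySem.List.enumerate_cons, List.foldl_cons, ih]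
    simp [linesFold, rowFold]

-- ===== VERDICT (by name: the statement is the Claim_ definition above) =====
theorem from_lifestring_spec : Claim_equal_from_lifestring := by
  intro s _
  unfold Spec_from_lifestring from_lifestring from_lifestring_alt
  rw [splitOn_eq_mySplit, foldA_eq_linesFold, ← foldB_eq_linesFold]
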